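-- pv_equiv track=rewrite | github.com/Satoru577/Reversi_game | board.py | judg_U
-- ===== SOURCE A (Python) =====
-- WHITE = (255, 255, 255)
--
-- BLACK = (0, 0, 0)
--
-- def judg_U(cells, idx_v, idx_h, count, can_put):
--     judg_flag = True
--     while judg_flag:
--         idx_L = idx_v - 1
--         if 0 <= idx_L <= 7:
--             judg = count
--             if cells[idx_L][idx_h][3] == WHITE:
--                 count -= 1
--             elif cells[idx_L][idx_h][3] == BLACK:
--                 count += 1
--             else:
--                 judg_flag = False
--                 continue
--             if count == 0:
--                 judg_flag = False
--                 continue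
--
--             if abs(judg) < abs(count):
--                 can_put = judg_U(cells, idx_L, idx_h, count, can_put)
--             elif abs(judg) > abs(count):
--                 can_put = 1
--             else:
--                 can_put = 0
--             judg_flag = False
--         else:
--             judg_flag = False
--     return can_put
-- ===== SOURCE B (Python) =====
-- WHITE = (255, 255, 255)
--
-- BLACK = (0, 0, 0)
--
-- def judg_U(cells, idx_v, idx_h, count, can_put):
--     row = idx_v - 1
--     if row < 0 or row > 7:
--         return can_put
--     c = count
--     while row >= 0:
--         cell = cells[row][idx_h][3]
--         if cell == WHITE:
--             d = -1
--         elif cell == BLACK: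
--             d = 1
--         else:
--             return can_put
--         if c * d < 0:
--             return can_put if abs(c) == 1 else 1
--         c += d
--         row -= 1
--     return can_put
-- ===== Notes on version B (the rewrite author's own statement) =====
-- stated objective: simpler
-- what changed: replaced A's self-recursive call and abs-value comparisons by a single iterative downward while-loop that keeps a running count and decides via a sign test on count*delta (return can_put when |count|==1, else 1); it reads exactly the same cells as A and raises exactly where A raises
import Mathlib
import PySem

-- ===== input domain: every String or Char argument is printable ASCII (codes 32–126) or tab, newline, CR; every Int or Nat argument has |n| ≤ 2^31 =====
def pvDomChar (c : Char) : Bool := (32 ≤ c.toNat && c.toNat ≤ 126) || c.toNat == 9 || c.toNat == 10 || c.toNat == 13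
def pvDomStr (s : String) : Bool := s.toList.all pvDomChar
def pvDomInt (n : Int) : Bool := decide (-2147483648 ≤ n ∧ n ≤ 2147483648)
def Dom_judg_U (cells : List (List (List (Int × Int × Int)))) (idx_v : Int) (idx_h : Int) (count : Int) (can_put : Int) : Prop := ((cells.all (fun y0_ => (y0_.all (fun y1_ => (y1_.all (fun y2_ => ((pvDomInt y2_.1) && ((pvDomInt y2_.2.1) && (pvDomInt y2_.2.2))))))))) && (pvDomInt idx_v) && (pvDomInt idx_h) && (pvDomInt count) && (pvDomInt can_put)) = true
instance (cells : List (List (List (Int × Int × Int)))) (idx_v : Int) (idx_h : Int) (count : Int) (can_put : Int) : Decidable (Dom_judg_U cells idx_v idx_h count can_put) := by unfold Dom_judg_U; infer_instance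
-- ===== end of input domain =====

-- B replaces A's self-recursion and abs-value comparisons by one iterative downward loop with a
-- sign test on count·delta (objective: simpler). Return-value equivalence on Pre_.

-- cells[i][idx_h][3], exactly Python's chained (possibly negative) indexing; none = IndexError
def pvAcc (cells : List (List (List (Int × Int × Int)))) (i : Int) (idx_h : Int) : Option (Int × Int × Int) :=
  (PySem.List.pyGet? cells i).bind (fun row =>
    (PySem.List.pyGet? row idx_h).bind (fun sq => PySem.List.pyGet? sq 3))

-- ===== PORT A =====
def judg_U (cells : List (List (List (Int × Int × Int)))) (idx_v : Int) (idx_h : Int) (count : Int) (can_put : Int) : Int :=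
  -- the while loop's body runs exactly once (every path clears judg_flag), so it is one pass
  if h : 0 ≤ idx_v - 1 ∧ idx_v - 1 ≤ 7 then
    match pvAcc cells (idx_v - 1) idx_h with
    | none => 0  -- Python raises IndexError here; excluded by Pre_
    | some cell =>
      if cell = (255, 255, 255) then
        if count - 1 = 0 then can_put
        else if count.natAbs < (count - 1).natAbs then judg_U cells (idx_v - 1) idx_h (count - 1) can_put
        else if count.natAbs > (count - 1).natAbs then 1
        else 0
      else if cell = (0, 0, 0) then
        if count + 1 = 0 then can_put
        else if count.natAbs < (count + 1).natAbs then judg_U cells (idx_v - 1) idx_h (count + 1) can_put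
        else if count.natAbs > (count + 1).natAbs then 1
        else 0
      else can_put
  else can_put
termination_by (idx_v).toNat
decreasing_by all_goals exact (Int.toNat_lt_toNat (lt_of_lt_of_le Int.one_pos (Int.sub_nonneg.mp h.1))).mpr (sub_one_lt idx_v)

-- ===== PORT B =====
def judgUAltLoop (cells : List (List (List (Int × Int × Int)))) (idx_h : Int) (row : Int) (c : Int) (can_put : Int) : Int :=
  if h : 0 ≤ row then
    match pvAcc cells row idx_h with
    | none => 0  -- Python raises IndexError here; excluded by Pre_
    | some cell =>
      if cell = (255, 255, 255) then
        if c * (-1) < 0 then (if c.natAbs = 1 then can_put else 1)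
        else judgUAltLoop cells idx_h (row - 1) (c + (-1)) can_put
      else if cell = (0, 0, 0) then
        if c * 1 < 0 then (if c.natAbs = 1 then can_put else 1)
        else judgUAltLoop cells idx_h (row - 1) (c + 1) can_put
      else can_put
  else can_put
termination_by (row + 1).toNat
decreasing_by all_goals
  simp only [sub_add_cancel]
  exact (Int.toNat_lt_toNat (Int.lt_add_one_iff.mpr h)).mpr (lt_add_one row)

def judg_U_alt (cells : List (List (List (Int × Int × Int)))) (idx_v : Int) (idx_h : Int) (count : Int) (can_put : Int) : Int :=
  if idx_v - 1 < 0 ∨ idx_v - 1 > 7 then can_put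
  else judgUAltLoop cells idx_h (idx_v - 1) count can_put

-- ===== PRECONDITION & SPEC =====
-- the cell colour at row j, with a harmless non-colour default where the access would raise
def pvCellD (cells : List (List (List (Int × Int × Int)))) (idx_h : Int) (j : Nat) : Int × Int × Int :=
  (pvAcc cells (j : Int) idx_h).getD (1, 1, 1)
-- the count increment a cell contributes: -1 for WHITE, +1 for BLACK, 0 otherwise
def pvDelta (cells : List (List (List (Int × Int × Int)))) (idx_h : Int) (j : Nat) : Int :=
  if pvCellD cells idx_h j = (255, 255, 255) then -1
  else if pvCellD cells idx_h j = (0, 0, 0) then 1 else 0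
-- the running count A holds when it inspects row j (starting row r0 = idx_v - 1)
def pvCnt (cells : List (List (List (Int × Int × Int)))) (idx_h : Int) (count : Int) (r0 j : Nat) : Int :=
  count + ((List.range (r0 - j)).map (fun t => pvDelta cells idx_h (j + 1 + t))).sum
-- A walks below row j iff the cell colour matches the running count's direction
def pvContB (cells : List (List (List (Int × Int × Int)))) (idx_h : Int) (count : Int) (r0 j : Nat) : Bool :=
  (pvCellD cells idx_h j == (255, 255, 255) && decide (pvCnt cells idx_h count r0 j ≤ 0)) ||
  (pvCellD cells idx_h j == (0, 0, 0) && decide (0 ≤ pvCnt cells idx_h count r0 j))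

-- Pre_ excludes exactly the inputs on which A's walk reaches a row i where cells[i][idx_h][3]
-- raises IndexError (B performs the identical walk and raises on exactly the same inputs).
def Pre_judg_U (cells : List (List (List (Int × Int × Int)))) (idx_v : Int) (idx_h : Int) (count : Int) (can_put : Int) : Prop :=
  (if 0 ≤ idx_v - 1 ∧ idx_v - 1 ≤ 7 then
    (List.range 8).all (fun i =>
      !(decide ((i : Int) ≤ idx_v - 1)) ||
      !((List.range 8).all (fun j =>
          !(decide (i < j) && decide ((j : Int) ≤ idx_v - 1)) ||
          ((pvAcc cells (j : Int) idx_h).isSome && pvContB cells idx_h count (idx_v - 1).toNat j))) ||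
      (pvAcc cells (i : Int) idx_h).isSome)
  else true) = true
instance (cells : List (List (List (Int × Int × Int)))) (idx_v : Int) (idx_h : Int) (count : Int) (can_put : Int) : Decidable (Pre_judg_U cells idx_v idx_h count can_put) := by unfold Pre_judg_U; infer_instance
def pvWitness_judg_U : (List (List (List (Int × Int × Int)))) × Int × Int × Int × Int :=
  ([[[(0,0,0),(0,0,0),(0,0,0),(0,0,0)]]], 1, 0, 1, 0)
def Spec_judg_U (cells : List (List (List (Int × Int × Int)))) (idx_v : Int) (idx_h : Int) (count : Int) (can_put : Int) (out : Int) : Prop := out = judg_U_alt cells idx_v idx_h count can_put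
instance (cells : List (List (List (Int × Int × Int)))) (idx_v : Int) (idx_h : Int) (count : Int) (can_put : Int) (out : Int) : Decidable (Spec_judg_U cells idx_v idx_h count can_put out) := by unfold Spec_judg_U; infer_instance

-- ===== CLAIM (what is proved, stated in full; the proofs are below) =====
def Claim_equal_judg_U : Prop := ∀ (cells : List (List (List (Int × Int × Int)))) (idx_v : Int) (idx_h : Int) (count : Int) (can_put : Int), Dom_judg_U cells idx_v idx_h count can_put → Pre_judg_U cells idx_v idx_h count can_put → Spec_judg_U cells idx_v idx_h count can_put (judg_U cells idx_v idx_h count can_put)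

-- ===== LEMMAS AND PROOFS =====
-- The two Lean ports agree on ALL inputs (both return 0 where their Pythons raise, and they
-- raise at the same place); Pre_ is what ties each port to its Python, not what the ports'
-- agreement needs.

lemma judg_U_step (cells : List (List (List (Int × Int × Int)))) (idx_h can_put : Int)
    (r c : Int) (h0 : 0 ≤ r) (h7 : r ≤ 7) (cell : Int × Int × Int)
    (hc : pvAcc cells r idx_h = some cell) :
    judg_U cells (r + 1) idx_h c can_put =
      if cell = (255, 255, 255) then
        if c - 1 = 0 then can_put
        else if c.natAbs < (c - 1).natAbs then judg_U cells r idx_h (c - 1) can_put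
        else if c.natAbs > (c - 1).natAbs then 1
        else 0
      else if cell = (0, 0, 0) then
        if c + 1 = 0 then can_put
        else if c.natAbs < (c + 1).natAbs then judg_U cells r idx_h (c + 1) can_put
        else if c.natAbs > (c + 1).natAbs then 1
        else 0
      else can_put := by
  rw [judg_U]
  simp only [add_sub_cancel_right, hc]
  rw [dif_pos ⟨h0, h7⟩]

lemma judg_U_none (cells : List (List (List (Int × Int × Int)))) (idx_h can_put : Int)
    (r c : Int) (h0 : 0 ≤ r) (h7 : r ≤ 7)
    (hc : pvAcc cells r idx_h = none) :
    judg_U cells (r + 1) idx_h c can_put = 0 := by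
  rw [judg_U]
  simp only [add_sub_cancel_right, hc]
  rw [dif_pos ⟨h0, h7⟩]

lemma loop_step (cells : List (List (List (Int × Int × Int)))) (idx_h can_put : Int)
    (r c : Int) (h0 : 0 ≤ r) (cell : Int × Int × Int)
    (hc : pvAcc cells r idx_h = some cell) :
    judgUAltLoop cells idx_h r c can_put =
      if cell = (255, 255, 255) then
        if c * (-1) < 0 then (if c.natAbs = 1 then can_put else 1)
        else judgUAltLoop cells idx_h (r - 1) (c + (-1)) can_put
      else if cell = (0, 0, 0) then
        if c * 1 < 0 then (if c.natAbs = 1 then can_put else 1)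
        else judgUAltLoop cells idx_h (r - 1) (c + 1) can_put
      else can_put := by
  rw [judgUAltLoop]
  simp only [hc]
  rw [dif_pos h0]

lemma loop_none (cells : List (List (List (Int × Int × Int)))) (idx_h can_put : Int)
    (r c : Int) (h0 : 0 ≤ r)
    (hc : pvAcc cells r idx_h = none) :
    judgUAltLoop cells idx_h r c can_put = 0 := by
  rw [judgUAltLoop]
  simp only [hc]
  rw [dif_pos h0]

lemma loop_eq (cells : List (List (List (Int × Int × Int)))) (idx_h can_put : Int) :
    ∀ n : Nat, n ≤ 7 → ∀ c : Int,
      judgUAltLoop cells idx_h (n : Int) c can_put = judg_U cells ((n : Int) + 1) idx_h c can_put := by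
  intro n
  induction n with
  | zero =>
    intro _ c
    have key : ∀ c' : Int, judgUAltLoop cells idx_h ((0 : Int) - 1) c' can_put
        = judg_U cells (0 : Int) idx_h c' can_put := by
      intro c'
      rw [judgUAltLoop, judg_U]
      norm_num
    simp only [Nat.cast_zero]
    cases hc : pvAcc cells (0 : Int) idx_h with
    | none =>
      rw [loop_none cells idx_h can_put 0 c le_rfl hc,
          judg_U_none cells idx_h can_put 0 c le_rfl (by norm_num) hc]
    | some cell =>
      rw [loop_step cells idx_h can_put 0 c le_rfl cell hc,
          judg_U_step cells idx_h can_put 0 c le_rfl (by norm_num) cell hc]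
      rw [key (c + (-1)), key (c + 1)]
      split_ifs <;> first | rfl | omega
  | succ m ih =>
    intro hn c
    have key : ∀ c' : Int, judgUAltLoop cells idx_h (((m : Int) + 1) - 1) c' can_put
        = judg_U cells ((m : Int) + 1) idx_h c' can_put := by
      intro c'
      have : ((m : Int) + 1) - 1 = (m : Int) := by ring
      rw [this]
      exact ih (by omega) c'
    push_cast
    cases hc : pvAcc cells ((m : Int) + 1) idx_h with
    | none =>
      rw [loop_none cells idx_h can_put ((m : Int) + 1) c (by positivity) hc,
          judg_U_none cells idx_h can_put ((m : Int) + 1) c (by positivity) (by omega) hc]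
    | some cell =>
      rw [loop_step cells idx_h can_put ((m : Int) + 1) c (by positivity) cell hc,
          judg_U_step cells idx_h can_put ((m : Int) + 1) c (by positivity) (by omega) cell hc]
      rw [key (c + (-1)), key (c + 1)]
      split_ifs <;> first | rfl | omega

-- ===== VERDICT (by name: the statement is the Claim_ definition above) =====
theorem judg_U_spec : Claim_equal_judg_U := by
  intro cells idx_v idx_h count can_put _ _
  unfold Spec_judg_U judg_U_alt
  by_cases h : 0 ≤ idx_v - 1 ∧ idx_v - 1 ≤ 7
  · rw [if_neg (by omega)]
    have hn : idx_v - 1 = ((idx_v - 1).toNat : Int) := by omega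
    have := loop_eq cells idx_h can_put (idx_v - 1).toNat (by omega) count
    rw [hn, this]
    congr 1
    omega
  · rw [if_pos (by omega)]
    rw [judg_U, dif_neg h]
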